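-- pv_equiv track=rewrite | github.com/Emanuel-DevX/The_Chess_War-Rise_of_a_Soldier | map.py | generate_level_walls
-- ===== SOURCE A (Python) =====
-- def generate_level_walls(center_row, center_col, size=8):
--     """
--     Generate walls surrounding a level.
--
--     :param center_row: An integer representing the starting row of the level interior.
--     :param center_col: An integer representing the starting column of the level interior.
--     :param size: The size of the square level interior (default is 8).
--     :return: List of (row, col) tuples representing the wall tiles.
--
--     >>> walls = generate_level_walls(10, 10)
--     >>> len(walls)  # 10x10 outer boundary - 8x8 inner space
--     36
--     >>> (9, 9) in walls  # Top-left corner of wall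
--     True
--     >>> (18, 18) in walls  # Bottom-right corner of wall
--     True
--     >>> (10, 10) in walls  # Interior tile, should not be in walls
--     False
--     """
--     return [
--         (row, col)
--         for row in range(center_row - 1, center_row + size + 1)
--         for col in range(center_col - 1, center_col + size + 1)
--         if row == center_row - 1 or row == center_row + size
--            or col == center_col - 1 or col == center_col + size
--     ]
-- ===== SOURCE B (Python) =====
-- def generate_level_walls(center_row, center_col, size=8):
--     """Emit only the perimeter tiles directly: full top row, left/right
--     columns for each middle row, full bottom row (O(size) instead of
--     scanning the whole (size+2)^2 square)."""
--     top, bottom = center_row - 1, center_row + size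
--     left, right = center_col - 1, center_col + size
--     walls = [(top, c) for c in range(left, right + 1)]
--     for r in range(top + 1, bottom):
--         walls.append((r, left))
--         walls.append((r, right))
--     if bottom > top:
--         walls.extend((bottom, c) for c in range(left, right + 1))
--     return walls
-- ===== Notes on version B (the rewrite author's own statement) =====
-- stated objective: faster
-- what changed: B emits the perimeter directly (full top row, the two edge columns for each middle row, full bottom row) instead of scanning every cell of the (size+2)x(size+2) square and filtering for boundary membership.
import Mathlib
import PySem

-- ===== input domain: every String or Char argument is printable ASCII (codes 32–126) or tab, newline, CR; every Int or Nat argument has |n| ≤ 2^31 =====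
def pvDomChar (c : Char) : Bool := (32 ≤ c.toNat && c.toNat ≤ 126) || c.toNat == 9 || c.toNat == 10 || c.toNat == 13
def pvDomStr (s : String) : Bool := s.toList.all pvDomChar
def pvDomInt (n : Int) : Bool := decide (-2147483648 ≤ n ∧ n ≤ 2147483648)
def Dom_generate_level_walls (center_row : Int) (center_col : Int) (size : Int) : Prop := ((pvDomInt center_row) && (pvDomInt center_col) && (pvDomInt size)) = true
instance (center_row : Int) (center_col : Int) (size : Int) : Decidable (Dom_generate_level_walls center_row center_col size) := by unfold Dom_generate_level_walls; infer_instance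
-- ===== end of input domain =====

-- B replaces A's scan of the whole (size+2)×(size+2) square by directly emitting
-- the perimeter tiles (top row, two edge columns per middle row, bottom row): O(size) vs O(size^2).

-- ===== PORT A =====
-- A: one comprehension over all cells of the square, keeping the boundary ones.
def generate_level_walls (center_row : Int) (center_col : Int) (size : Int) : List (Int × Int) :=
  (PySem.List.pyRange (center_row - 1) (center_row + size + 1) 1).flatMap (fun row =>
    (PySem.List.pyRange (center_col - 1) (center_col + size + 1) 1).filterMap (fun col =>
      if row = center_row - 1 ∨ row = center_row + size ∨
         col = center_col - 1 ∨ col = center_col + size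
      then some (row, col) else none))

-- ===== PORT B =====
def generate_level_walls_alt (center_row : Int) (center_col : Int) (size : Int) : List (Int × Int) :=
  let top := center_row - 1
  let bottom := center_row + size
  let left := center_col - 1
  let right := center_col + size
  let walls := (PySem.List.pyRange left (right + 1) 1).map (fun c => (top, c))
  let walls := (PySem.List.pyRange (top + 1) bottom 1).foldl
      (fun acc r => acc ++ [(r, left), (r, right)]) walls
  if bottom > top then
    walls ++ (PySem.List.pyRange left (right + 1) 1).map (fun c => (bottom, c))
  else walls

-- ===== PRECONDITION & SPEC =====
def Spec_generate_level_walls (center_row : Int) (center_col : Int) (size : Int) (out : List (Int × Int)) : Prop := out = generate_level_walls_alt center_row center_col size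
instance (center_row : Int) (center_col : Int) (size : Int) (out : List (Int × Int)) : Decidable (Spec_generate_level_walls center_row center_col size out) := by unfold Spec_generate_level_walls; infer_instance

-- ===== CLAIM (what is proved, stated in full; the proofs are below) =====
def Claim_equal_generate_level_walls : Prop := ∀ (center_row : Int) (center_col : Int) (size : Int), Dom_generate_level_walls center_row center_col size → Spec_generate_level_walls center_row center_col size (generate_level_walls center_row center_col size)

-- ===== LEMMAS AND PROOFS =====

-- A's inner comprehension on a boundary row (condition always true) is the full row.
theorem pv_inner_full (cr cc size row : Int)
    (h : row = cr - 1 ∨ row = cr + size) :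
    (PySem.List.pyRange (cc - 1) (cc + size + 1) 1).filterMap (fun col =>
      if row = cr - 1 ∨ row = cr + size ∨ col = cc - 1 ∨ col = cc + size
      then some (row, col) else none)
    = (PySem.List.pyRange (cc - 1) (cc + size + 1) 1).map (fun c => (row, c)) := by
  rcases h with h | h <;>
    simp [h]

-- A's inner comprehension on a middle row keeps only the two edge columns.
theorem pv_inner_mid (cr cc size row : Int) (hs : 0 ≤ size)
    (h1 : row ≠ cr - 1) (h2 : row ≠ cr + size) :
    (PySem.List.pyRange (cc - 1) (cc + size + 1) 1).filterMap (fun col =>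
      if row = cr - 1 ∨ row = cr + size ∨ col = cc - 1 ∨ col = cc + size
      then some (row, col) else none)
    = [(row, cc - 1), (row, cc + size)] := by
  rw [PySem.List.pyRange_one_cons (by omega), show cc - 1 + 1 = cc from by ring,
      PySem.List.pyRange_one_succ_right (a := cc) (b := cc + size) (by omega)]
  simp [h1, h2]
  intro a ha hb
  omega

theorem generate_level_walls_eq (cr cc size : Int) :
    generate_level_walls cr cc size = generate_level_walls_alt cr cc size := by
  unfold generate_level_walls generate_level_walls_alt
  simp only
  rw [PySem.List.foldl_append_eq_flatMap]
  by_cases hs : 0 ≤ size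
  · -- rows = [cr-1] ++ middle ++ [cr+size]
    rw [if_pos (show cr + size > cr - 1 by omega)]
    rw [PySem.List.pyRange_one_cons (a := cr - 1) (by omega), show cr - 1 + 1 = cr from by ring,
        PySem.List.pyRange_one_succ_right (a := cr) (b := cr + size) (by omega)]
    rw [List.flatMap_cons, List.flatMap_append, List.flatMap_singleton]
    rw [pv_inner_full cr cc size (cr - 1) (Or.inl rfl),
        pv_inner_full cr cc size (cr + size) (Or.inr rfl)]
    have hmid : (PySem.List.pyRange cr (cr + size) 1).flatMap (fun row =>
        (PySem.List.pyRange (cc - 1) (cc + size + 1) 1).filterMap (fun col =>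
          if row = cr - 1 ∨ row = cr + size ∨ col = cc - 1 ∨ col = cc + size
          then some (row, col) else none))
        = (PySem.List.pyRange cr (cr + size) 1).flatMap
            (fun row => [(row, cc - 1), (row, cc + size)]) := by
      refine List.flatMap_congr (fun r hr => ?_)
      rw [PySem.List.mem_pyRange_one] at hr
      exact pv_inner_mid cr cc size r hs (by omega) (by omega)
    rw [hmid]
    simp [List.append_assoc]
  · -- size < 0: at most one row, and no middle rows on either side
    rw [if_neg (by omega)]
    have hmid : PySem.List.pyRange (cr - 1 + 1) (cr + size) 1 = [] :=
      PySem.List.pyRange_one_eq_nil (by omega)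
    rw [hmid]
    by_cases h1 : size = -1
    · subst h1
      rw [show cr + (-1) + 1 = (cr - 1) + 1 by ring]
      rw [PySem.List.pyRange_one_singleton]
      simp
    · -- size ≤ -2: everything empty
      rw [PySem.List.pyRange_one_eq_nil (a := cr - 1) (by omega),
          PySem.List.pyRange_one_eq_nil (a := cc - 1) (by omega)]
      simp

-- ===== VERDICT (by name: the statement is the Claim_ definition above) =====
theorem generate_level_walls_spec : Claim_equal_generate_level_walls := by
  intro cr cc size _
  unfold Spec_generate_level_walls
  exact generate_level_walls_eq cr cc size
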